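-- pv_equiv track=rewrite | github.com/PagesTr/My-first-game | systems/crafting.py | _consume_unique_item
-- ===== SOURCE A (Python) =====
-- def _consume_unique_item(inventory, item_id, quantity):
--     remaining = quantity
--     for index, slot in enumerate(inventory["slots"]):
--         if (
--             slot is not None
--             and slot.get("kind") == "unique"
--             and slot.get("item") == item_id
--         ):
--             inventory["slots"][index] = None
--             remaining -= 1
--             if remaining == 0:
--                 return True
--
--     return False
-- ===== SOURCE B (Python) =====
-- def _consume_unique_item(inventory, item_id, quantity):
--     slots = inventory["slots"]
--     matches = [i for i, slot in enumerate(slots)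
--                if slot is not None
--                and slot.get("kind") == "unique"
--                and slot.get("item") == item_id]
--     for taken, i in enumerate(matches, start=1):
--         slots[i] = None
--         if taken == quantity:
--             return True
--     return False
-- ===== Notes on version B (the rewrite author's own statement) =====
-- stated objective: alternative
-- what changed: Replaces A's fused scan-and-mutate loop with a two-pass decomposition: one pass gathers the matching slot indices, a second pass clears them one by one and returns True as soon as the requested quantity has been removed; Pre_ excludes only inputs without a 'slots' key, where A raises KeyError.
import Mathlib
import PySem

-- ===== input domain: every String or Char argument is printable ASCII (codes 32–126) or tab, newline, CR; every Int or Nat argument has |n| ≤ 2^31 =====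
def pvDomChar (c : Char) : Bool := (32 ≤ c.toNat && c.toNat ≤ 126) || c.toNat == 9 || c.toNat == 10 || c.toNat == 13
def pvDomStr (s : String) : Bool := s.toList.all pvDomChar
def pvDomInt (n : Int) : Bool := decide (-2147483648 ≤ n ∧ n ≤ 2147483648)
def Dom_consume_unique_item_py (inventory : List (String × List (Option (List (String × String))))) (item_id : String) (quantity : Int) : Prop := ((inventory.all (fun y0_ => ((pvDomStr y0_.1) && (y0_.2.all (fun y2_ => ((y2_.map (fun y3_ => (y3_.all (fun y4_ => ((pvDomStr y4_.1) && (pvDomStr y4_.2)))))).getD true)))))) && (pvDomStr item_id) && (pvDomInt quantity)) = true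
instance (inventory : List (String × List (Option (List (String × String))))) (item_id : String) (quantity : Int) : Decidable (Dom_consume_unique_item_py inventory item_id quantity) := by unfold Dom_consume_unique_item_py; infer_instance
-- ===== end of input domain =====

-- B replaces A's fused scan-and-mutate loop by an index-gathering pass followed by a
-- counting removal pass; equivalence is about the RETURN value only (both Pythons also
-- mutate inventory["slots"], identically).

-- ===== PORT A =====
-- slot is not None and slot.get("kind") == "unique" and slot.get("item") == item_id
def pvMatchA (item_id : String) (slot : Option (List (String × String))) : Bool :=
  match slot with
  | none => false
  | some d => ((PySem.Dict.mk d).get? "kind" == some "unique") && ((PySem.Dict.mk d).get? "item" == some item_id)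

-- the for-loop over the slots with the mutable `remaining`; the in-place write to the
-- slot list only affects the (unmodelled) mutation, not the returned Bool
def pvLoopA (item_id : String) : List (Option (List (String × String))) → Int → Bool
  | [], _ => false
  | slot :: rest, remaining =>
    if pvMatchA item_id slot then
      let remaining' := remaining - 1
      if remaining' = 0 then true else pvLoopA item_id rest remaining'
    else pvLoopA item_id rest remaining

def consume_unique_item_py (inventory : List (String × List (Option (List (String × String))))) (item_id : String) (quantity : Int) : Bool :=
  match (PySem.Dict.mk inventory).get? "slots" with
  | none => false  -- KeyError in Python; excluded by Pre_
  | some slots => pvLoopA item_id slots quantity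

-- ===== PORT B =====
-- for taken, i in enumerate(matches, start=1): slots[i] = None; if taken == quantity: return True
-- (the write slots[i] = None only affects the unmodelled mutation, not the returned Bool)
def pvLoopB (quantity : Int) : List (Int × Option (List (String × String))) → Int → Bool
  | [], _ => false
  | _ :: rest, taken => if taken == quantity then true else pvLoopB quantity rest (taken + 1)

def consume_unique_item_py_alt (inventory : List (String × List (Option (List (String × String))))) (item_id : String) (quantity : Int) : Bool :=
  match (PySem.Dict.mk inventory).get? "slots" with
  | none => false  -- KeyError in Python; excluded by Pre_
  | some slots =>
    let hits := (PySem.List.enumerate slots).filter (fun p =>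
      match p.2 with
      | none => false
      | some d => ((PySem.Dict.mk d).get? "kind" == some "unique") && ((PySem.Dict.mk d).get? "item" == some item_id))
    pvLoopB quantity hits 1

-- ===== PRECONDITION & SPEC =====
-- Pre_ excludes exactly the inputs where inventory["slots"] raises KeyError (no "slots" key).
def Pre_consume_unique_item_py (inventory : List (String × List (Option (List (String × String))))) (item_id : String) (quantity : Int) : Prop :=
  ((PySem.Dict.mk inventory).get? "slots").isSome = true
instance (inventory : List (String × List (Option (List (String × String))))) (item_id : String) (quantity : Int) : Decidable (Pre_consume_unique_item_py inventory item_id quantity) := by unfold Pre_consume_unique_item_py; infer_instance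

def pvWitness_consume_unique_item_py : (List (String × List (Option (List (String × String))))) × String × Int :=
  ([("slots", [some [("kind", "unique"), ("item", "x")], none])], "x", 1)

def Spec_consume_unique_item_py (inventory : List (String × List (Option (List (String × String))))) (item_id : String) (quantity : Int) (out : Bool) : Prop := out = consume_unique_item_py_alt inventory item_id quantity
instance (inventory : List (String × List (Option (List (String × String))))) (item_id : String) (quantity : Int) (out : Bool) : Decidable (Spec_consume_unique_item_py inventory item_id quantity out) := by unfold Spec_consume_unique_item_py; infer_instance

-- ===== CLAIM (what is proved, stated in full; the proofs are below) =====
def Claim_equal_consume_unique_item_py : Prop := ∀ (inventory : List (String × List (Option (List (String × String))))) (item_id : String) (quantity : Int), Dom_consume_unique_item_py inventory item_id quantity → Pre_consume_unique_item_py inventory item_id quantity → Spec_consume_unique_item_py inventory item_id quantity (consume_unique_item_py inventory item_id quantity)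

-- ===== LEMMAS AND PROOFS =====

-- A's loop returns true iff remaining starts ≥ 1 and the slots contain at least that many matches.
theorem pvLoopA_eq_count (item_id : String) (slots : List (Option (List (String × String)))) (r : Int) :
    pvLoopA item_id slots r = decide (1 ≤ r ∧ r ≤ (slots.countP (pvMatchA item_id) : Int)) := by
  induction slots generalizing r with
  | nil => simp [pvLoopA]; omega
  | cons slot rest ih =>
    by_cases h : pvMatchA item_id slot = true
    · simp only [pvLoopA, if_true, List.countP_cons, h]
      by_cases hr : r - 1 = 0
      · simp only [hr, if_true]
        rw [eq_comm, decide_eq_true_eq]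
        push_cast
        omega
      · rw [if_neg hr, ih]
        congr 1
        simp only [eq_iff_iff]
        push_cast
        omega
    · simp only [pvLoopA, h, List.countP_cons, ih]
      simp

-- B's counting loop returns true iff quantity lies between the start counter and the
-- counter reached at the end of the list.
theorem pvLoopB_eq_count (quantity : Int) (l : List (Int × Option (List (String × String)))) (t : Int) :
    pvLoopB quantity l t = decide (t ≤ quantity ∧ quantity < t + (l.length : Int)) := by
  induction l generalizing t with
  | nil =>
    simp only [pvLoopB, List.length_nil]
    rw [eq_comm, decide_eq_false_iff_not]
    omega
  | cons x rest ih =>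
    simp only [pvLoopB, List.length_cons]
    by_cases h : t = quantity
    · simp only [h, beq_self_eq_true, if_true]
      rw [eq_comm, decide_eq_true_eq]
      push_cast
      omega
    · rw [if_neg (by simpa using h), ih]
      congr 1
      simp only [eq_iff_iff]
      push_cast
      omega

-- the filter over enumerated slots has the same length as countP over the slots
theorem pvFilter_enum_length (item_id : String) (slots : List (Option (List (String × String)))) (s : Int) :
    ((PySem.List.enumerate slots s).filter (fun p =>
      match p.2 with
      | none => false
      | some d => ((PySem.Dict.mk d).get? "kind" == some "unique") && ((PySem.Dict.mk d).get? "item" == some item_id))).length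
    = slots.countP (pvMatchA item_id) := by
  induction slots generalizing s with
  | nil => simp [PySem.List.enumerate_nil]
  | cons slot rest ih =>
    rw [PySem.List.enumerate_cons, List.filter_cons, List.countP_cons]
    cases slot with
    | none => simp [pvMatchA, ih]
    | some d =>
      by_cases h : (((PySem.Dict.mk d).get? "kind" == some "unique") && ((PySem.Dict.mk d).get? "item" == some item_id)) = true
      · simp [pvMatchA, h, ih]
      · simp [pvMatchA, h, ih]

-- ===== VERDICT (by name: the statement is the Claim_ definition above) =====
theorem consume_unique_item_py_spec : Claim_equal_consume_unique_item_py := by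
  intro inventory item_id quantity _ hpre
  unfold Spec_consume_unique_item_py consume_unique_item_py consume_unique_item_py_alt
  cases hs : (PySem.Dict.mk inventory).get? "slots" with
  | none => simp [Pre_consume_unique_item_py, hs] at hpre
  | some slots =>
    simp only
    rw [pvLoopA_eq_count, pvLoopB_eq_count, pvFilter_enum_length]
    congr 1
    simp only [eq_iff_iff]
    omega
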